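-- pv_equiv track=rewrite | github.com/shourjoguha/Alloy-V0 | scripts/test_5day_enhanced_system_fixed.py | _is_optimal_spacing
-- ===== SOURCE A (Python) =====
-- from typing import Dict, Any, List, Optional
--
-- def _is_optimal_spacing(training_days: List[int]) -> bool:
--     """Check if training day spacing is optimal."""
--     if len(training_days) != 5:
--         return False
--
--     # Check for maximum 2 consecutive training days
--     consecutive_count = 1
--     max_consecutive = 1
--
--     for i in range(1, len(training_days)):
--         if training_days[i] == training_days[i-1] + 1:
--             consecutive_count += 1
--             max_consecutive = max(max_consecutive, consecutive_count)
--         else: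
--             consecutive_count = 1
--
--     return max_consecutive <= 2
-- ===== SOURCE B (Python) =====
-- from typing import List
--
-- def _is_optimal_spacing(training_days: List[int]) -> bool:
--     """Check if training day spacing is optimal."""
--     if len(training_days) != 5:
--         return False
--     # forbidden pattern: three consecutive calendar days anywhere
--     for i in range(2, len(training_days)):
--         if training_days[i] == training_days[i - 1] + 1 and training_days[i - 1] == training_days[i - 2] + 1:
--             return False
--     return True
-- ===== Notes on version B (the rewrite author's own statement) =====
-- stated objective: simpler
-- what changed: Replaces the consecutive_count/max_consecutive accumulator pass with a direct three-in-a-row window test that returns False early when training_days[i-2..i] are three consecutive days.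
import Mathlib
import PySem

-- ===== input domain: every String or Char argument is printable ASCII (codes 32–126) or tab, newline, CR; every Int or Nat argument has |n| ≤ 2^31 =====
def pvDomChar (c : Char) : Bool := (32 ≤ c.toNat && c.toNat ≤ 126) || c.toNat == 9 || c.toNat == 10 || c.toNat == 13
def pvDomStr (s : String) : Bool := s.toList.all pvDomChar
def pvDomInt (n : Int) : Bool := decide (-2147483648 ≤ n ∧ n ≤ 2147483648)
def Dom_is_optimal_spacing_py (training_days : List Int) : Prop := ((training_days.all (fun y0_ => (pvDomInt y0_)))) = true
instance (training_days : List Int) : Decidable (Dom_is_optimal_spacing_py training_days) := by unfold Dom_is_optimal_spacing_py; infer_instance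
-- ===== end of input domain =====

-- ===== PORT A =====
-- B replaces the max-run accumulators with a direct three-consecutive-days window test (objective: simpler).
def is_optimal_spacing_py (training_days : List Int) : Bool :=
  if training_days.length ≠ 5 then false
  else
    let st := (PySem.List.pyRange 1 (training_days.length) 1).foldl
      (fun (s : Int × Int) i =>
        if (PySem.List.pyGet? training_days i).getD 0 =
           (PySem.List.pyGet? training_days (i - 1)).getD 0 + 1 then
          (s.1 + 1, max s.2 (s.1 + 1))
        else (1, s.2)) (1, 1)
    decide (st.2 ≤ 2)

-- ===== PORT B =====
def altLoop (training_days : List Int) : List Int → Bool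
  | [] => true
  | i :: rest =>
    if (PySem.List.pyGet? training_days i).getD 0 =
         (PySem.List.pyGet? training_days (i - 1)).getD 0 + 1 ∧
       (PySem.List.pyGet? training_days (i - 1)).getD 0 =
         (PySem.List.pyGet? training_days (i - 2)).getD 0 + 1 then false
    else altLoop training_days rest

def is_optimal_spacing_py_alt (training_days : List Int) : Bool :=
  if training_days.length ≠ 5 then false
  else altLoop training_days (PySem.List.pyRange 2 (training_days.length) 1)

-- ===== PRECONDITION & SPEC =====
def Spec_is_optimal_spacing_py (training_days : List Int) (out : Bool) : Prop := out = is_optimal_spacing_py_alt training_days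
instance (training_days : List Int) (out : Bool) : Decidable (Spec_is_optimal_spacing_py training_days out) := by unfold Spec_is_optimal_spacing_py; infer_instance

-- ===== CLAIM (what is proved, stated in full; the proofs are below) =====
def Claim_equal_is_optimal_spacing_py : Prop := ∀ (training_days : List Int), Dom_is_optimal_spacing_py training_days → Spec_is_optimal_spacing_py training_days (is_optimal_spacing_py training_days)

-- ===== LEMMAS AND PROOFS =====

-- ===== VERDICT (by name: the statement is the Claim_ definition above) =====
theorem is_optimal_spacing_py_spec : Claim_equal_is_optimal_spacing_py := by
  intro td _
  unfold Spec_is_optimal_spacing_py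
  rcases td with _ | ⟨a, _ | ⟨b, _ | ⟨c, _ | ⟨d, _ | ⟨e, _ | ⟨f, rest⟩⟩⟩⟩⟩⟩ <;>
    simp only [is_optimal_spacing_py, is_optimal_spacing_py_alt, List.length] <;>
    try norm_num
  · show _ = altLoop _ _
    simp [PySem.List.pyRange, PySem.List.pyGet?, PySem.List.pyIdx?,
      List.range_succ, altLoop]
    split_ifs <;> simp_all
  · have h5 : rest.length + 1 + 1 + 1 + 1 + 1 + 1 ≠ 5 := by omega
    simp [h5]
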